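-- pv_equiv track=rewrite | github.com/kevinlmadison/python_examples | xrd.py | orderFiles
-- ===== SOURCE A (Python) =====
-- def orderFiles(files):
-- 	newFiles = ['0','0','0','0']
-- 	for file in files:
--
-- 		if(('ttw' in file or '2tw' in file) and '102' not in file):
-- 			if('_00_' in file):
-- 				newFiles[0] = file
--
-- 			elif('_18_' in file):
-- 				newFiles[1] = file
--
-- 		if(('omega' in file  or 'Omega' in file) and '102' not in file):
-- 			if('_00_' in file):
-- 				newFiles[2] = file
--
-- 			elif('_18_' in file):
-- 				newFiles[3] = file
--
-- 	return newFiles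
-- ===== SOURCE B (Python) =====
-- def orderFiles(files):
--     def _grp(f, a, b):
--         return (a in f or b in f) and '102' not in f
--     preds = [
--         lambda f: _grp(f, 'ttw', '2tw') and '_00_' in f,
--         lambda f: _grp(f, 'ttw', '2tw') and '_00_' not in f and '_18_' in f,
--         lambda f: _grp(f, 'omega', 'Omega') and '_00_' in f,
--         lambda f: _grp(f, 'omega', 'Omega') and '_00_' not in f and '_18_' in f,
--     ]
--     return [next((f for f in reversed(files) if p(f)), '0') for p in preds]
-- ===== Notes on version B (the rewrite author's own statement) =====
-- stated objective: simpler
-- what changed: Replaced the file-outer loop with mutable slot assignments by a slot-outer formulation: a table of four slot predicates, each slot computed independently as the last matching file (reversed scan, default '0'), eliminating the nested if/elif branch tree and the mutable result list.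
import Mathlib
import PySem

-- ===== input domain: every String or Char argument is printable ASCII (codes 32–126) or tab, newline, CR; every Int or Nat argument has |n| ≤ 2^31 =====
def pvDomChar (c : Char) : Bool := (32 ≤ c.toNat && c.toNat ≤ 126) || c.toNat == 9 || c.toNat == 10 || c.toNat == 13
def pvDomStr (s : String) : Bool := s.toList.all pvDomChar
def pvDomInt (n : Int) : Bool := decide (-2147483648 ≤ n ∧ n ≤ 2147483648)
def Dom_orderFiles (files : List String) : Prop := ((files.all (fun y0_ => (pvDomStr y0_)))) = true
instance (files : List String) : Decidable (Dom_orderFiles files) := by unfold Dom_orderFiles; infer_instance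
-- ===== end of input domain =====

-- B replaces A's file-outer loop with mutation of a 4-slot list by a slot-outer formulation:
-- a table of four slot predicates, each slot computed independently as the last matching file
-- (reversed scan) with default "0". Objective: simpler; return value proven equal on all inputs.

-- ===== PORT A =====
-- loop body of A: the two sequential if-blocks with their nested if/elif, mutating newFiles
def orderFilesStep (newFiles : List String) (file : String) : List String :=
  let nf1 :=
    if (PySem.Str.isIn "ttw" file || PySem.Str.isIn "2tw" file) && !PySem.Str.isIn "102" file then
      (if PySem.Str.isIn "_00_" file then newFiles.set 0 file
       else if PySem.Str.isIn "_18_" file then newFiles.set 1 file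
       else newFiles)
    else newFiles
  if (PySem.Str.isIn "omega" file || PySem.Str.isIn "Omega" file) && !PySem.Str.isIn "102" file then
    (if PySem.Str.isIn "_00_" file then nf1.set 2 file
     else if PySem.Str.isIn "_18_" file then nf1.set 3 file
     else nf1)
  else nf1

def orderFiles (files : List String) : List String :=
  files.foldl orderFilesStep ["0", "0", "0", "0"]

-- ===== PORT B =====
-- grp f a b = (a in f or b in f) and '102' not in f
def orderFilesGrp (f a b : String) : Bool :=
  (PySem.Str.isIn a f || PySem.Str.isIn b f) && !PySem.Str.isIn "102" f

def orderFilesPreds : List (String → Bool) :=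
  [ fun f => orderFilesGrp f "ttw" "2tw" && PySem.Str.isIn "_00_" f,
    fun f => orderFilesGrp f "ttw" "2tw" && !PySem.Str.isIn "_00_" f && PySem.Str.isIn "_18_" f,
    fun f => orderFilesGrp f "omega" "Omega" && PySem.Str.isIn "_00_" f,
    fun f => orderFilesGrp f "omega" "Omega" && !PySem.Str.isIn "_00_" f && PySem.Str.isIn "_18_" f ]

def orderFiles_alt (files : List String) : List String :=
  orderFilesPreds.map (fun p => (files.reverse.find? p).getD "0")

-- ===== PRECONDITION & SPEC =====
def Spec_orderFiles (files : List String) (out : List String) : Prop := out = orderFiles_alt files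
instance (files : List String) (out : List String) : Decidable (Spec_orderFiles files out) := by unfold Spec_orderFiles; infer_instance

-- ===== CLAIM (what is proved, stated in full; the proofs are below) =====
def Claim_equal_orderFiles : Prop := ∀ (files : List String), Dom_orderFiles files → Spec_orderFiles files (orderFiles files)

-- ===== LEMMAS AND PROOFS =====
-- name the four slot predicates (equal to the entries of orderFilesPreds)
def pq0 (f : String) : Bool := orderFilesGrp f "ttw" "2tw" && PySem.Str.isIn "_00_" f
def pq1 (f : String) : Bool := orderFilesGrp f "ttw" "2tw" && !PySem.Str.isIn "_00_" f && PySem.Str.isIn "_18_" f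
def pq2 (f : String) : Bool := orderFilesGrp f "omega" "Omega" && PySem.Str.isIn "_00_" f
def pq3 (f : String) : Bool := orderFilesGrp f "omega" "Omega" && !PySem.Str.isIn "_00_" f && PySem.Str.isIn "_18_" f

-- A's loop body updates each of the four slots independently, by its slot predicate
lemma step_eq (a b c d : String) (x : String) :
    orderFilesStep [a, b, c, d] x =
      [if pq0 x then x else a, if pq1 x then x else b,
       if pq2 x then x else c, if pq3 x then x else d] := by
  simp only [orderFilesStep, pq0, pq1, pq2, pq3, orderFilesGrp]
  split_ifs <;> simp_all

-- last match of l ++ [x] = x if x matches, else last match of l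
lemma find_snoc_getD (l : List String) (x d : String) (p : String → Bool) :
    (((l ++ [x]).find? p).getD d) = (l.find? p).getD (if p x then x else d) := by
  rw [List.find?_append]
  cases h : l.find? p <;> by_cases hx : p x <;> simp [hx, List.find?]

-- loop invariant: A's fold from state [a,b,c,d] yields each slot's last match with that slot as default
lemma fold_eq (fs : List String) : ∀ a b c d : String,
    fs.foldl orderFilesStep [a, b, c, d] =
      [((fs.reverse.find? pq0).getD a), ((fs.reverse.find? pq1).getD b),
       ((fs.reverse.find? pq2).getD c), ((fs.reverse.find? pq3).getD d)] := by
  induction fs with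
  | nil => intro a b c d; simp
  | cons x fs ih =>
      intro a b c d
      simp only [List.foldl_cons, step_eq, ih, List.reverse_cons, find_snoc_getD]

-- ===== VERDICT (by name: the statement is the Claim_ definition above) =====
theorem orderFiles_spec : Claim_equal_orderFiles := by
  intro files _
  show orderFiles files = orderFiles_alt files
  rw [orderFiles, fold_eq]
  rfl
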